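-- pv_equiv track=rewrite | github.com/nathanvercaemert/composition | chapter-boundaries/orchestrator.py | compute_max_adjacent_page_sum
-- ===== SOURCE A (Python) =====
-- from typing import Any, Callable, Dict, List, Optional, Sequence, Set, Tuple
--
-- def compute_max_adjacent_page_sum(final_ranges: Dict[str, List[str]]) -> Tuple[int | None, str | None]:
--     """
--     Compute the maximum pages for any chapter when combined with its adjacent chapters.
--     Only numeric chapters are considered for adjacency.
--     """
--     numeric_counts = {int(ch): len(pages) for ch, pages in final_ranges.items() if ch.isdigit()}
--     if not numeric_counts:
--         return None, None
--
--     max_total = -1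
--     max_center: int | None = None
--
--     for chapter_num in sorted(numeric_counts):
--         total = (
--             numeric_counts.get(chapter_num - 1, 0)
--             + numeric_counts[chapter_num]
--             + numeric_counts.get(chapter_num + 1, 0)
--         )
--         if total > max_total:
--             max_total = total
--             max_center = chapter_num
--
--     return max_total, str(max_center) if max_center is not None else None
-- ===== SOURCE B (Python) =====
-- def compute_max_adjacent_page_sum(final_ranges):
--     # Scatter (convolution) approach: instead of gathering each chapter's window
--     # sum from its neighbors, each numeric chapter's page count is scattered into
--     # the totals of the (numeric) chapters whose window it belongs to; the answer
--     # is the maximum total, tie-broken to the smallest chapter number via min().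
--     counts = {int(ch): len(pages) for ch, pages in final_ranges.items() if ch.isdigit()}
--     if not counts:
--         return None, None
--
--     totals = {k: 0 for k in counts}
--     for k, c in counts.items():
--         for j in (k - 1, k, k + 1):
--             if j in totals:
--                 totals[j] += c
--
--     best = max(totals.values())
--     center = min(k for k, t in totals.items() if t == best)
--     return best, str(center)
-- ===== Notes on version B (the rewrite author's own statement) =====
-- stated objective: alternative
-- what changed: B inverts A's gather-style window sums into a scatter pass (each chapter's count is added into the totals of the windows it belongs to) and replaces A's sorted running-best scan by direct max-of-totals / min-of-argmax selection, so no sort and no ordered traversal is needed.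
import Mathlib
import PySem

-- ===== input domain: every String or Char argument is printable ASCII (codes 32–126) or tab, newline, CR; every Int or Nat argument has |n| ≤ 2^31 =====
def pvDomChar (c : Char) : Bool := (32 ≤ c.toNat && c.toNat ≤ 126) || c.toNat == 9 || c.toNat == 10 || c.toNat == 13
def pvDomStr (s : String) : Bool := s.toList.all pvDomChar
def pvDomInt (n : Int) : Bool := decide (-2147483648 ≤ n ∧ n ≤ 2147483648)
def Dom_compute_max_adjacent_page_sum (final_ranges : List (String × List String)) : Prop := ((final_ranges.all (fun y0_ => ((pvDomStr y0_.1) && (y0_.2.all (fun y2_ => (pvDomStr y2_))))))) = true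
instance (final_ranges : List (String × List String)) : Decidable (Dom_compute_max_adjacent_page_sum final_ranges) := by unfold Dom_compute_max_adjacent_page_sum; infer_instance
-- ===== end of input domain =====

-- B replaces A's gather-and-sorted-scan by a scatter pass building window totals plus
-- max/min selection with explicit smallest-chapter tie-break (objective: alternative).


-- shared helper: numeric_counts / counts = {int(ch): len(pages) for ch, pages in final_ranges.items() if ch.isdigit()}
-- (the identical dict comprehension appears in A and B; int(ch) cannot raise since
-- ch.isdigit() guarantees an ASCII digit string on Dom, so ofStr? is some — .getD 0 unreachable)
def pvCounts (final_ranges : List (String × List String)) : PySem.Dict Int Int :=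
  final_ranges.foldl
    (fun d p =>
      if PySem.Str.strIsdigit p.1 then d.insert ((PySem.Int.ofStr? p.1).getD 0) (p.2.length : Int)
      else d)
    PySem.Dict.empty

-- ===== PORT A =====
-- A's loop body: total = get(k-1,0) + numeric_counts[k] + get(k+1,0); keep it if total > max_total
-- (numeric_counts[k]: key always present, KeyError unreachable, ported as (get? k).getD 0)
def pvLoopA (nc : PySem.Dict Int Int) (st : Int × Option Int) (chapter_num : Int) : Int × Option Int :=
  let total := nc.getD (chapter_num - 1) 0 + (nc.get? chapter_num).getD 0 + nc.getD (chapter_num + 1) 0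
  if total > st.1 then (total, some chapter_num) else st

def compute_max_adjacent_page_sum (final_ranges : List (String × List String)) : Option Int × Option String :=
  let numeric_counts := pvCounts final_ranges
  if numeric_counts.size = 0 then (none, none)
  else
    -- for chapter_num in sorted(numeric_counts): … with state (max_total, max_center)
    let r := (PySem.List.sorted numeric_counts.keys (fun x => x) false).foldl
      (pvLoopA numeric_counts) (-1, none)
    (some r.1, r.2.map PySem.Int.toStr)

-- ===== PORT B =====
-- B's scatter step for one item (k, c): for j in (k-1, k, k+1): if j in totals: totals[j] += c
def pvScatter (d : PySem.Dict Int Int) (p : Int × Int) : PySem.Dict Int Int :=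
  [p.1 - 1, p.1, p.1 + 1].foldl
    (fun d j => if d.contains j then d.modify j 0 (· + p.2) else d) d

def compute_max_adjacent_page_sum_alt (final_ranges : List (String × List String)) : Option Int × Option String :=
  let counts := pvCounts final_ranges
  if counts.size = 0 then (none, none)
  else
    -- totals = {k: 0 for k in counts}; then the scatter loop over counts.items()
    let totals0 := counts.keys.foldl (fun d k => d.insert k (0 : Int)) PySem.Dict.empty
    let totals := counts.items.foldl pvScatter totals0
    -- best = max(totals.values()); center = min(k for k, t in totals.items() if t == best)
    match PySem.List.max? totals.values (fun x => x) with
    | none => (none, none)  -- unreachable: totals is nonempty here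
    | some best =>
      match PySem.List.min? ((totals.items.filter (fun p => p.2 == best)).map (·.1)) (fun x => x) with
      | none => (none, none)  -- unreachable: the maximum is attained
      | some center => (some best, some (PySem.Int.toStr center))

-- ===== PRECONDITION & SPEC =====
def Spec_compute_max_adjacent_page_sum (final_ranges : List (String × List String)) (out : Option Int × Option String) : Prop := out = compute_max_adjacent_page_sum_alt final_ranges
instance (final_ranges : List (String × List String)) (out : Option Int × Option String) : Decidable (Spec_compute_max_adjacent_page_sum final_ranges out) := by unfold Spec_compute_max_adjacent_page_sum; infer_instance

-- ===== CLAIM (what is proved, stated in full; the proofs are below) =====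
def Claim_equal_compute_max_adjacent_page_sum : Prop := ∀ (final_ranges : List (String × List String)), Dom_compute_max_adjacent_page_sum final_ranges → Spec_compute_max_adjacent_page_sum final_ranges (compute_max_adjacent_page_sum final_ranges)

-- ===== LEMMAS AND PROOFS =====

-- the window-total function both programs' results are about
def pvT (nc : PySem.Dict Int Int) (k : Int) : Int :=
  nc.getD (k - 1) 0 + nc.getD k 0 + nc.getD (k + 1) 0

theorem pvCounts_keys_nodup (fr : List (String × List String)) : (pvCounts fr).keys.Nodup := by
  unfold pvCounts
  generalize hd : (PySem.Dict.empty : PySem.Dict Int Int) = d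
  have hnd : d.keys.Nodup := by rw [← hd]; simp [PySem.Dict.keys_empty]
  clear hd
  induction fr generalizing d with
  | nil => exact hnd
  | cons p l ih =>
    simp only [List.foldl_cons]
    split
    · exact ih _ (PySem.Dict.nodup_keys_insert _ _ _ hnd)
    · exact ih _ hnd

theorem pvCounts_nonneg (fr : List (String × List String)) (k : Int) :
    0 ≤ (pvCounts fr).getD k 0 := by
  unfold pvCounts
  generalize hd : (PySem.Dict.empty : PySem.Dict Int Int) = d
  have hnn : ∀ k : Int, 0 ≤ d.getD k 0 := by
    intro k; rw [← hd]; simp [PySem.Dict.getD_empty]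
  clear hd
  induction fr generalizing d with
  | nil => exact hnn k
  | cons p l ih =>
    simp only [List.foldl_cons]
    split
    · refine ih _ ?_
      intro k'
      rw [PySem.Dict.getD_insert]
      split
      · positivity
      · exact hnn k'
    · exact ih _ hnn

-- A's loop body written with pvT (getD = get?.getD)
theorem pvLoopA_eq (nc : PySem.Dict Int Int) :
    pvLoopA nc = fun st k => if pvT nc k > st.1 then (pvT nc k, some k) else st := by
  funext st k
  simp only [pvLoopA, pvT, ← PySem.Dict.getD_eq_get?_getD]

-- keys are untouched by one scatter step
theorem pvScatter_keys (d : PySem.Dict Int Int) (p : Int × Int) : (pvScatter d p).keys = d.keys := by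
  simp only [pvScatter, List.foldl_cons, List.foldl_nil]
  split_ifs <;>
    simp_all [PySem.Dict.contains_modify, PySem.Dict.keys_modify,
      PySem.Dict.keys_insert_of_contains]

-- one conditional-modify step of the scatter loop
theorem pvStep1_keys (d : PySem.Dict Int Int) (j c : Int) :
    (if d.contains j then d.modify j 0 (· + c) else d).keys = d.keys := by
  split_ifs with h <;>
    simp_all [PySem.Dict.keys_modify, PySem.Dict.keys_insert_of_contains]

theorem pvStep1_contains (d : PySem.Dict Int Int) (j c k : Int) :
    (if d.contains j then d.modify j 0 (· + c) else d).contains k = d.contains k := by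
  rw [PySem.Dict.contains_eq_decide_mem_keys, pvStep1_keys, ← PySem.Dict.contains_eq_decide_mem_keys]

theorem pvStep1_getD (d : PySem.Dict Int Int) (j c k : Int) :
    (if d.contains j then d.modify j 0 (· + c) else d).getD k 0
      = d.getD k 0 + (if d.contains k = true ∧ k = j then c else 0) := by
  by_cases hc : d.contains j = true
  · rw [if_pos hc, PySem.Dict.getD_modify]
    by_cases hk : k = j
    · subst hk; simp [hc]
    · simp [hk]
  · rw [if_neg hc]
    by_cases hk : k = j
    · subst hk; simp [hc]
    · simp [hk]

-- one scatter step adds p.2 to exactly the contained keys among p.1-1, p.1, p.1+1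
theorem pvScatter_getD (d : PySem.Dict Int Int) (p : Int × Int) (k : Int) :
    (pvScatter d p).getD k 0
      = d.getD k 0 + (if d.contains k ∧ (p.1 = k - 1 ∨ p.1 = k ∨ p.1 = k + 1) then p.2 else 0) := by
  show ((fun d j => if d.contains j then d.modify j 0 (· + p.2) else d) ((fun d j => if d.contains j then d.modify j 0 (· + p.2) else d) ((fun d j => if d.contains j then d.modify j 0 (· + p.2) else d) d (p.1 - 1)) p.1) (p.1 + 1)).getD k 0 = _
  simp only
  rw [pvStep1_getD, pvStep1_getD, pvStep1_getD, pvStep1_contains, pvStep1_contains,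
    pvStep1_contains]
  by_cases hA : d.contains k = true
  · simp only [hA, true_and]
    split_ifs <;> omega
  · simp only [hA]
    simp

-- the whole scatter loop
theorem pvScatter_foldl_getD (l : List (Int × Int)) (d : PySem.Dict Int Int) (k : Int) :
    (l.foldl pvScatter d).getD k 0
      = d.getD k 0 + (if d.contains k then
          ((l.filter (fun p => p.1 = k - 1 ∨ p.1 = k ∨ p.1 = k + 1)).map (·.2)).sum else 0) := by
  induction l generalizing d with
  | nil => simp
  | cons p tl ih =>
    simp only [List.foldl_cons, List.filter_cons]
    rw [ih, pvScatter_getD]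
    have hc : (pvScatter d p).contains k = d.contains k := by
      rw [PySem.Dict.contains_eq_decide_mem_keys, pvScatter_keys,
        ← PySem.Dict.contains_eq_decide_mem_keys]
    rw [hc]
    by_cases hA : d.contains k = true
    · simp only [hA, true_and, if_true]
      by_cases h2 : p.1 = k - 1 ∨ p.1 = k ∨ p.1 = k + 1
      · simp [h2]; ring
      · simp [h2]
    · simp [hA]

theorem pvScatter_foldl_keys (l : List (Int × Int)) (d : PySem.Dict Int Int) :
    (l.foldl pvScatter d).keys = d.keys := by
  induction l generalizing d with
  | nil => rfl
  | cons p tl ih => rw [List.foldl_cons, ih, pvScatter_keys]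

-- sum of the values of items at a given key = getD (keys nodup)
theorem pvSum_filter_key (nc : PySem.Dict Int Int) (hnd : nc.keys.Nodup) (j : Int) :
    ((nc.items.filter (fun p => p.1 == j)).map (·.2)).sum = nc.getD j 0 := by
  rw [PySem.Dict.items_eq_map_keys nc hnd 0, List.filter_map, List.map_map]
  have hpred : ((fun p : Int × Int => p.1 == j) ∘ fun k => (k, nc.getD k 0)) = (fun k => k == j) := rfl
  have hmap : ((fun p : Int × Int => p.2) ∘ fun k => (k, nc.getD k 0)) = (fun k => nc.getD k 0) := rfl
  rw [hpred, hmap, List.filter_beq]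
  by_cases hj : j ∈ nc.keys
  · rw [List.count_eq_one_of_mem hnd hj, List.replicate_one]
    simp
  · rw [List.count_eq_zero_of_not_mem hj, List.replicate_zero]
    have : nc.getD j 0 = 0 := by
      apply PySem.Dict.getD_of_not_contains
      rw [PySem.Dict.contains_eq_decide_mem_keys]
      simp [hj]
    simp [this]

-- the three-neighbour filtered sum splits into the three single-key sums
theorem pvSum_filter_three (l : List (Int × Int)) (k : Int) :
    ((l.filter (fun p => p.1 = k - 1 ∨ p.1 = k ∨ p.1 = k + 1)).map (·.2)).sum
      = ((l.filter (fun p => p.1 == k - 1)).map (·.2)).sum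
        + ((l.filter (fun p => p.1 == k)).map (·.2)).sum
        + ((l.filter (fun p => p.1 == k + 1)).map (·.2)).sum := by
  have ne1 : (k - 1 : Int) ≠ k := by omega
  have ne2 : (k - 1 : Int) ≠ k + 1 := by omega
  have ne3 : (k : Int) ≠ k + 1 := by omega
  induction l with
  | nil => simp
  | cons p tl ih =>
    simp only [List.filter_cons]
    by_cases h1 : p.1 = k - 1 <;> by_cases h2 : p.1 = k <;> by_cases h3 : p.1 = k + 1 <;>
      first
        | omega
        | (simp [h1, h2, h3, ne1, ne2, ne3, ne1.symm, ne2.symm, ne3.symm]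
           simp only [Bool.decide_or] at ih ⊢
           omega)

-- A's sorted running-best scan, characterised: result = (max of t, least argmax)
theorem pvFoldA_spec (t : Int → Int) (l : List Int) (c : Int)
    (hl : (c :: l).Pairwise (· < ·)) :
    ∃ M m, l.foldl (fun (st : Int × Option Int) k => if t k > st.1 then (t k, some k) else st)
        (t c, some c) = (M, some m)
      ∧ m ∈ c :: l ∧ t m = M ∧ (∀ k ∈ c :: l, t k ≤ M) ∧ (∀ k ∈ c :: l, t k = M → m ≤ k) := by
  induction l generalizing c with
  | nil =>
    exact ⟨t c, c, rfl, by simp, rfl, by simp, by simp⟩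
  | cons k tl ih =>
    have hck : c < k := (List.pairwise_cons.mp hl).1 k (by simp)
    have hl' : (k :: tl).Pairwise (· < ·) := hl.of_cons
    simp only [List.foldl_cons]
    by_cases h : t k > t c
    · rw [if_pos h]
      obtain ⟨M, m, hfold, hmem, htm, hub, hmin⟩ := ih k hl'
      refine ⟨M, m, hfold, by simp [List.mem_cons] at hmem ⊢; tauto, htm, ?_, ?_⟩
      · intro j hj
        rcases List.mem_cons.mp hj with rfl | hj'
        · exact le_trans (le_of_lt h) (hub k (by simp))
        · exact hub j hj'
      · intro j hj hjM
        rcases List.mem_cons.mp hj with rfl | hj'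
        · exfalso
          have := hub k (by simp)
          omega
        · exact hmin j hj' hjM
    · rw [if_neg h]
      have hl'' : (c :: tl).Pairwise (· < ·) := by
        rw [List.pairwise_cons] at hl ⊢
        refine ⟨fun j hj => hl.1 j (by simp [hj]), (List.pairwise_cons.mp hl.2).2⟩
      obtain ⟨M, m, hfold, hmem, htm, hub, hmin⟩ := ih c hl''
      refine ⟨M, m, hfold, ?_, htm, ?_, ?_⟩
      · simp [List.mem_cons] at hmem ⊢; tauto
      · intro j hj
        rcases List.mem_cons.mp hj with rfl | hj'
        · exact hub j (by simp)
        · rcases List.mem_cons.mp hj' with rfl | hj''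
          · have := hub c (by simp)
            omega
          · exact hub j (by simp [hj''])
      · intro j hj hjM
        rcases List.mem_cons.mp hj with rfl | hj'
        · exact hmin j (by simp) hjM
        · rcases List.mem_cons.mp hj' with rfl | hj''
          · have hcM : t c = M := by
              have := hub c (by simp)
              omega
            have := hmin c (by simp) hcM
            omega
          · exact hmin j (by simp [hj'']) hjM

-- ===== VERDICT (by name: the statement is the Claim_ definition above) =====
theorem compute_max_adjacent_page_sum_spec : Claim_equal_compute_max_adjacent_page_sum := by
  intro fr _
  unfold Spec_compute_max_adjacent_page_sum compute_max_adjacent_page_sum compute_max_adjacent_page_sum_alt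
  have hnd := pvCounts_keys_nodup fr
  have hnn : ∀ k : Int, 0 ≤ (pvCounts fr).getD k 0 := pvCounts_nonneg fr
  generalize pvCounts fr = nc at hnd hnn ⊢
  by_cases hsz : nc.size = 0
  · rw [if_pos hsz, if_pos hsz]
  rw [if_neg hsz, if_neg hsz]
  show ((some ((PySem.List.sorted nc.keys (fun x => x) false).foldl (pvLoopA nc) (-1, none)).1,
         ((PySem.List.sorted nc.keys (fun x => x) false).foldl (pvLoopA nc) (-1, none)).2.map
           PySem.Int.toStr) : Option Int × Option String)
      = match PySem.List.max?
            ((nc.items.foldl pvScatter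
                (nc.keys.foldl (fun d k => d.insert k (0 : Int)) PySem.Dict.empty)).values)
            (fun x => x) with
        | none => ((none : Option Int), (none : Option String))
        | some best =>
          match PySem.List.min?
              (((nc.items.foldl pvScatter
                  (nc.keys.foldl (fun d k => d.insert k (0 : Int)) PySem.Dict.empty)).items.filter
                    (fun p => p.2 == best)).map (fun x => x.1))
              (fun x => x) with
          | none => (none, none)
          | some center => (some best, some (PySem.Int.toStr center))
  set t := pvT nc with ht
  -- totals0 facts
  set totals0 := nc.keys.foldl (fun d k => d.insert k (0 : Int)) PySem.Dict.empty with htot0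
  have h0items : totals0.items = nc.keys.map (fun k => (k, (0 : Int))) := by
    rw [htot0, PySem.Dict.items_foldl_insert_fresh (k := fun x => x) (v := fun _ => (0 : Int))]
    · simp only [show (PySem.Dict.empty : PySem.Dict Int Int).items = [] from rfl,
        List.nil_append]
    · intro a _; exact PySem.Dict.contains_empty a
    · simpa using hnd
  have h0keys : totals0.keys = nc.keys := by
    simp only [PySem.Dict.keys, h0items, List.map_map]
    simp
  have h0getD : ∀ k : Int, totals0.getD k 0 = 0 := by
    intro k
    by_cases hk : k ∈ nc.keys
    · refine PySem.Dict.getD_of_mem_items _ ?_ ?_ 0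
      · rw [h0items]; exact List.mem_map.mpr ⟨k, hk, rfl⟩
      · rw [h0keys]; exact hnd
    · apply PySem.Dict.getD_of_not_contains
      rw [PySem.Dict.contains_eq_decide_mem_keys, h0keys]
      simp [hk]
  -- totals facts
  set totals := nc.items.foldl pvScatter totals0 with htot
  have htkeys : totals.keys = nc.keys := by rw [htot, pvScatter_foldl_keys, h0keys]
  have htnd : totals.keys.Nodup := by rw [htkeys]; exact hnd
  have htget : ∀ k ∈ nc.keys, totals.getD k 0 = t k := by
    intro k hk
    rw [htot, pvScatter_foldl_getD, h0getD]
    have hc : totals0.contains k = true := by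
      rw [PySem.Dict.contains_eq_decide_mem_keys, h0keys]
      simp [hk]
    rw [if_pos hc, pvSum_filter_three, pvSum_filter_key nc hnd, pvSum_filter_key nc hnd,
      pvSum_filter_key nc hnd]
    simp [ht, pvT]
  have hitems : totals.items = nc.keys.map (fun k => (k, t k)) := by
    rw [PySem.Dict.items_eq_map_keys totals htnd 0, htkeys]
    exact List.map_congr_left (fun k hk => by rw [htget k hk])
  have hvalues : totals.values = nc.keys.map t := by
    simp only [PySem.Dict.values, hitems, List.map_map]
    rfl
  -- the sorted key list
  have hperm : (PySem.List.sorted nc.keys (fun x => x) false).Perm nc.keys :=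
    PySem.List.sorted_perm _ _ _
  have hpw : (PySem.List.sorted nc.keys (fun x => x) false).Pairwise (· < ·) := by
    have h1 : (PySem.List.sorted nc.keys (fun x => x) false).Pairwise (· ≤ ·) :=
      PySem.List.sorted_pairwise nc.keys (fun x => x)
    have h2 : (PySem.List.sorted nc.keys (fun x => x) false).Nodup := hperm.nodup_iff.mpr hnd
    exact (h1.and h2).imp (fun h => lt_of_le_of_ne h.1 h.2)
  have hkeysne : nc.keys ≠ [] := by
    intro h
    exact hsz (by simpa [PySem.Dict.keys, PySem.Dict.size] using congrArg List.length h)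
  have hskne : PySem.List.sorted nc.keys (fun x => x) false ≠ [] := by
    intro h
    have h2 : ([] : List Int).Perm nc.keys := h ▸ hperm
    exact hkeysne (List.perm_nil.mp h2.symm)
  obtain ⟨c, l, hsk⟩ := List.exists_cons_of_ne_nil hskne
  -- A's fold
  rw [pvLoopA_eq nc, hsk]
  have htnn : ∀ k : Int, 0 ≤ t k := by
    intro k
    have h1 := hnn (k - 1); have h2 := hnn k; have h3 := hnn (k + 1)
    simp only [ht, pvT]; omega
  rw [List.foldl_cons, if_pos (by have := htnn c; omega : t c > (-1 : Int))]
  obtain ⟨M, m, hfold, hmem, htm, hub, hmin⟩ := pvFoldA_spec t l c (hsk ▸ hpw)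
  rw [hfold]
  have hmem' : m ∈ nc.keys := hperm.mem_iff.mp (hsk ▸ hmem)
  -- B's max
  rw [hvalues]
  cases hmax : PySem.List.max? (nc.keys.map t) (fun x => x) with
  | none =>
    rw [PySem.List.max?_eq_none_iff] at hmax
    exact absurd (List.map_eq_nil_iff.mp hmax) hkeysne
  | some M₂ =>
  have hM2 : M₂ = M := by
    obtain ⟨k₀, hk₀, hk₀t⟩ := List.mem_map.mp (PySem.List.max?_mem hmax)
    have hub2 : ∀ y ∈ nc.keys.map t, y ≤ M₂ := fun y hy => PySem.List.max?_isMax hmax y hy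
    have h1 : M ≤ M₂ := htm ▸ hub2 (t m) (List.mem_map.mpr ⟨m, hmem', rfl⟩)
    have h2 : M₂ ≤ M := hk₀t ▸ hub k₀ (hsk ▸ hperm.mem_iff.mpr hk₀)
    omega
  subst hM2
  -- B's min over the argmax keys
  have hfilt : (totals.items.filter (fun p => p.2 == M₂)).map (·.1)
      = nc.keys.filter (fun k => t k == M₂) := by
    rw [hitems, List.filter_map, List.map_map]
    have h1 : ((fun p : Int × Int => p.2 == M₂) ∘ fun k => (k, t k)) = (fun k => t k == M₂) := rfl
    have h2 : ((fun x : Int × Int => x.1) ∘ fun k => (k, t k)) = (fun k : Int => k) := rfl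
    rw [h1, h2, List.map_id']
  show (some (M₂, some m).1, Option.map PySem.Int.toStr (M₂, some m).2)
      = match PySem.List.min? ((totals.items.filter (fun p => p.2 == M₂)).map (fun x => x.1))
            (fun x => x) with
        | none => ((none : Option Int), (none : Option String))
        | some center => (some M₂, some (PySem.Int.toStr center))
  rw [hfilt]
  have hmfilt : m ∈ nc.keys.filter (fun k => t k == M₂) :=
    List.mem_filter.mpr ⟨hmem', by simp [htm]⟩
  cases hminr : PySem.List.min? (nc.keys.filter (fun k => t k == M₂)) (fun x => x) with
  | none =>
    rw [PySem.List.min?_eq_none_iff] at hminr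
    rw [hminr] at hmfilt
    simp at hmfilt
  | some m₂ =>
  have hm2 : m₂ = m := by
    have hm2f := PySem.List.min?_mem hminr
    have hm2k : m₂ ∈ nc.keys := (List.mem_filter.mp hm2f).1
    have hm2t : t m₂ = M₂ := by
      have := (List.mem_filter.mp hm2f).2
      simpa using this
    have h1 : m₂ ≤ m := PySem.List.min?_isMin hminr m hmfilt
    have h2 : m ≤ m₂ := hmin m₂ (hsk ▸ hperm.mem_iff.mpr hm2k) hm2t
    omega
  subst hm2
  rfl
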